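-- pv_equiv track=rewrite | github.com/noahlehmann/aoc-2023 | day_01/day_01.py | find_all_words
-- ===== SOURCE A (Python) =====
-- numbers = {
--     1: "one",
--     2: "two",
--     3: "three",
--     4: "four",
--     5: "five",
--     6: "six",
--     7: "seven",
--     8: "eight",
--     9: "nine",
-- }
--
-- def find_all_words(calibration: str, first) -> dict:
--     words = {}
--     for key in numbers.keys():
--         if first:
--             idx = calibration.find(numbers.get(key))
--         else:
--             idx = calibration.rfind(numbers.get(key))
--         if not idx == -1:
--             words[idx] = key
--     return words
-- ===== SOURCE B (Python) =====
-- numbers = {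
--     1: "one",
--     2: "two",
--     3: "three",
--     4: "four",
--     5: "five",
--     6: "six",
--     7: "seven",
--     8: "eight",
--     9: "nine",
-- }
--
-- def find_all_words(calibration: str, first) -> dict:
--     # single left-to-right scan over positions instead of one find/rfind per word
--     pos = {}
--     for i in range(len(calibration)):
--         for key, word in numbers.items():
--             if calibration.startswith(word, i):
--                 if first:
--                     if key not in pos:
--                         pos[key] = i
--                 else:
--                     pos[key] = i
--     words = {}
--     for key in numbers:
--         if key in pos:
--             words[pos[key]] = key
--     return words
-- ===== Notes on version B (the rewrite author's own statement) =====
-- stated objective: alternative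
-- what changed: Replaces the nine per-word find/rfind library searches with a single left-to-right scan over string positions that maintains a key->index dict (keep-first for first=True, overwrite for last), then builds the idx->key result from that dict.
import Mathlib
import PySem

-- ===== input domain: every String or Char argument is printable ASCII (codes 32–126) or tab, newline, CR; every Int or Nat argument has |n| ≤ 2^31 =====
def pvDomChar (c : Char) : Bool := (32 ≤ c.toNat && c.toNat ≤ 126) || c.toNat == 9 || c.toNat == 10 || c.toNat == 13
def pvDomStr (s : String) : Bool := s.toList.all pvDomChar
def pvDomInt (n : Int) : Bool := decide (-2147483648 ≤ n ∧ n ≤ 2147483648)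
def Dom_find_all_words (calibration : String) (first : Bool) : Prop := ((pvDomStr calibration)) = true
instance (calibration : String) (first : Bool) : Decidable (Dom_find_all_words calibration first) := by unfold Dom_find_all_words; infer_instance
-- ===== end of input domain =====

-- B replaces the nine find/rfind library searches of A by a single left-to-right scan over
-- positions that maintains a dict key→index (keep-first / overwrite-last); same return value.


-- the module-level constant `numbers` (shared by A and B, as in the Python module)
def numbersDict : PySem.Dict Int String :=
  ⟨[(1, "one"), (2, "two"), (3, "three"), (4, "four"), (5, "five"),
    (6, "six"), (7, "seven"), (8, "eight"), (9, "nine")]⟩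

-- ===== PORT A =====
-- for key in numbers.keys(): idx = find/rfind(numbers.get(key)); if idx != -1: words[idx] = key
-- (`numbers.get(key)` is always a hit here, so `.getD ""` never supplies the default)
def find_all_words (calibration : String) (first : Bool) : List (Int × Int) :=
  (numbersDict.keys.foldl
    (fun words key =>
      let w := (numbersDict.get? key).getD ""
      let idx : Int := if first then PySem.Str.find calibration w else PySem.Str.rfind calibration w
      if ¬ idx = -1 then words.insert idx key else words)
    (⟨[]⟩ : PySem.Dict Int Int)).items

-- ===== PORT B =====
-- body of B's inner loop: one (key, word) entry processed at position i
-- `calibration.startswith(word, i)` with 0 ≤ i ≤ len(calibration) is exactly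
-- "word is a prefix of calibration[i:]", i.e. Chars.startswith on the dropped list.
def pvInnerStep (first : Bool) (s : List Char) (i : Int)
    (pos : PySem.Dict Int Int) (kw : Int × String) : PySem.Dict Int Int :=
  if PySem.Chars.startswith (s.drop i.toNat) kw.2.toList then
    if first then
      if (pos.get? kw.1).isNone then pos.insert kw.1 i else pos
    else pos.insert kw.1 i
  else pos

def find_all_words_alt (calibration : String) (first : Bool) : List (Int × Int) :=
  let s := calibration.toList
  let pos := (PySem.List.pyRange 0 (PySem.Str.len calibration) 1).foldl
    (fun pos i => numbersDict.items.foldl (pvInnerStep first s i) pos)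
    (⟨[]⟩ : PySem.Dict Int Int)
  (numbersDict.items.foldl
    (fun words kw =>
      match pos.get? kw.1 with
      | some idx => words.insert idx kw.1
      | none => words)
    (⟨[]⟩ : PySem.Dict Int Int)).items

-- ===== PRECONDITION & SPEC =====
def Spec_find_all_words (calibration : String) (first : Bool) (out : List (Int × Int)) : Prop := out = find_all_words_alt calibration first
instance (calibration : String) (first : Bool) (out : List (Int × Int)) : Decidable (Spec_find_all_words calibration first out) := by unfold Spec_find_all_words; infer_instance

-- ===== CLAIM (what is proved, stated in full; the proofs are below) =====
def Claim_equal_find_all_words : Prop := ∀ (calibration : String) (first : Bool), Dom_find_all_words calibration first → Spec_find_all_words calibration first (find_all_words calibration first)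

-- ===== LEMMAS AND PROOFS =====

-- "word matches at position j"
def pvP (s w : List Char) (j : Nat) : Bool := PySem.Chars.startswith (s.drop j) w

-- the index B's scan keeps for word w after processing positions 0..m-1
def pvSpecPos (first : Bool) (s w : List Char) (m : Nat) : Option Nat :=
  if first then (List.range m).find? (pvP s w) else ((List.range m).filter (pvP s w)).getLast?

lemma pvFind?_range_some {p : Nat → Bool} {j : Nat} (h2 : p j = true)
    (h3 : ∀ i < j, ¬ p i = true) : ∀ n, j < n → (List.range n).find? p = some j := by
  intro n
  induction n with
  | zero => omega
  | succ m ih =>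
    intro h1
    rw [List.range_succ, List.find?_append]
    rcases Nat.lt_or_ge j m with hjm | hjm
    · rw [ih hjm]; rfl
    · have hj : j = m := by omega
      subst hj
      have hnone : (List.range j).find? p = none := by
        rw [List.find?_eq_none]; intro x hx; exact h3 x (List.mem_range.mp hx)
      simp [hnone, h2]

lemma pvRgo (s w : List Char) (x : Nat) :
    PySem.Chars.rfind.go s w x =
      (((List.range (x + 1)).filter (pvP s w)).getLast?).elim (-1) (fun j => (j : Int)) := by
  induction x with
  | zero =>
    by_cases h : w.isPrefixOf s
    · simp [PySem.Chars.rfind.go, h, List.range_succ, pvP, PySem.Chars.startswith]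
    · simp [PySem.Chars.rfind.go, h, List.range_succ, pvP, PySem.Chars.startswith]
  | succ j ih =>
    have hrange : List.range (j + 1 + 1) = List.range (j + 1) ++ [j + 1] := List.range_succ
    rw [hrange, List.filter_append, List.getLast?_append]
    by_cases h : w.isPrefixOf (List.drop (j + 1) s)
    · simp [PySem.Chars.rfind.go, h, pvP, PySem.Chars.startswith]
    · simp [PySem.Chars.rfind.go, h, pvP, PySem.Chars.startswith, ih]

-- effect of the inner loop (over entries with pairwise-distinct keys) on one key
lemma pvInner_get?_not_mem (first : Bool) (s : List Char) (i : Int)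
    (es : List (Int × String)) (d : PySem.Dict Int Int) (k : Int)
    (hk : k ∉ es.map Prod.fst) :
    (es.foldl (pvInnerStep first s i) d).get? k = d.get? k := by
  induction es generalizing d with
  | nil => rfl
  | cons e t ih =>
    simp only [List.map_cons, List.mem_cons, not_or] at hk
    have hne : k ≠ e.1 := hk.1
    have step : (pvInnerStep first s i d e).get? k = d.get? k := by
      unfold pvInnerStep
      split_ifs <;> simp [PySem.Dict.get?_insert_of_ne _ _ hne]
    rw [List.foldl_cons, ih _ hk.2, step]

lemma pvInner_get?_mem (first : Bool) (s : List Char) (i : Int)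
    (es : List (Int × String)) (d : PySem.Dict Int Int) (k : Int) (w : String)
    (hnd : (es.map Prod.fst).Nodup) (hmem : (k, w) ∈ es) :
    (es.foldl (pvInnerStep first s i) d).get? k =
      if PySem.Chars.startswith (s.drop i.toNat) w.toList then
        (if first then (if (d.get? k).isNone then some i else d.get? k) else some i)
      else d.get? k := by
  induction es generalizing d with
  | nil => cases hmem
  | cons e t ih =>
    simp only [List.map_cons, List.nodup_cons] at hnd
    rcases List.mem_cons.mp hmem with he | ht
    · -- head entry is (k, w); tail has no key k
      have hkt : k ∉ t.map Prod.fst := by rw [← he] at hnd; exact hnd.1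
      rw [List.foldl_cons, pvInner_get?_not_mem first s i t _ k hkt, ← he]
      unfold pvInnerStep
      split_ifs with h1 h2 h3 <;>
        simp_all [PySem.Dict.get?_insert_self]
    · -- key k lives in the tail; the head step cannot be about key k
      have hne : k ≠ e.1 := by
        intro h; exact hnd.1 (h ▸ List.mem_map_of_mem ht) |>.elim
      have step : (pvInnerStep first s i d e).get? k = d.get? k := by
        unfold pvInnerStep
        split_ifs <;> simp [PySem.Dict.get?_insert_of_ne _ _ hne]
      rw [List.foldl_cons, ih _ hnd.2 ht, step]

lemma pvNumbers_nodup : (numbersDict.items.map Prod.fst).Nodup := by decide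

lemma pvNumbers_get? : ∀ kw ∈ numbersDict.items, numbersDict.get? kw.1 = some kw.2 := by decide

lemma pvNumbers_ne_nil : ∀ kw ∈ numbersDict.items, kw.2.toList ≠ [] := by decide

-- invariant of B's outer scan: after positions 0..m-1 the dict holds exactly pvSpecPos
lemma pvOuter_inv (first : Bool) (s : List Char) (m : Nat) :
    ∀ k w, (k, w) ∈ numbersDict.items →
      (((List.range m).map ((fun j => ↑j) : Nat → Int)).foldl
          (fun pos i => numbersDict.items.foldl (pvInnerStep first s i) pos)
          (⟨[]⟩ : PySem.Dict Int Int)).get? k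
        = (pvSpecPos first s w.toList m).map ((fun j => ↑j) : Nat → Int) := by
  induction m with
  | zero =>
    intro k w _
    unfold pvSpecPos
    cases first <;> simp [PySem.Dict.get?]
  | succ m ih =>
    intro k w hmem
    rw [List.range_succ, List.map_append, List.foldl_append]
    simp only [List.map_cons, List.map_nil, List.foldl_cons, List.foldl_nil]
    rw [pvInner_get?_mem first s (m : Int) _ _ k w pvNumbers_nodup hmem, ih k w hmem]
    have htn : ((m : Int)).toNat = m := rfl
    rw [htn]
    unfold pvSpecPos
    cases first with
    | true =>
      simp only [if_true]
      rw [List.range_succ, List.find?_append]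
      by_cases hp : pvP s w.toList m
      · unfold pvP at hp
        cases hfd : (List.range m).find? (pvP s w.toList) <;> simp [hp, pvP]
      · unfold pvP at hp
        cases hfd : (List.range m).find? (pvP s w.toList) <;> simp [hp, pvP]
    | false =>
      simp only [Bool.false_eq_true, if_false]
      rw [List.range_succ, List.filter_append, List.getLast?_append]
      by_cases hp : pvP s w.toList m
      · unfold pvP at hp; simp [hp, pvP]
      · unfold pvP at hp; simp [hp, pvP]

-- what B's scan keeps for w over the whole string = A's find / rfind, packaged as an Option
lemma pvFirst_bridge (s w : List Char) (hw : w ≠ []) :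
    pvSpecPos true s w s.length =
      (if PySem.Chars.find s w = -1 then none else some (PySem.Chars.find s w).toNat) := by
  have hspec : pvSpecPos true s w s.length = (List.range s.length).find? (pvP s w) := by
    unfold pvSpecPos; rfl
  rw [hspec]
  rcases eq_or_lt_of_le (PySem.Chars.neg_one_le_find s w) with hneg | hpos
  · have hninf : ¬ w <:+: s := (PySem.Chars.find_eq_neg_one_iff s w).mp hneg.symm
    have hnone : (List.range s.length).find? (pvP s w) = none := by
      rw [List.find?_eq_none]
      intro j _ hj
      have hpre : w <+: s.drop j := (PySem.Chars.startswith_iff _ _).mp hj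
      exact hninf ((PySem.Chars.isIn_iff_infix w s).mp
        ((PySem.Chars.exists_prefix_drop_iff_isIn w s).mp ⟨j, hpre⟩))
    rw [hnone, if_pos hneg.symm]
  · have h0 : 0 ≤ PySem.Chars.find s w := by omega
    have hne : ¬ PySem.Chars.find s w = -1 := by omega
    obtain ⟨hpre, hmin⟩ := PySem.Chars.find_spec h0
    have hlt : (PySem.Chars.find s w).toNat < s.length := by
      by_contra hge
      have hd : s.drop (PySem.Chars.find s w).toNat = [] := List.drop_eq_nil_of_le (by omega)
      rw [hd] at hpre
      exact hw (List.prefix_nil.mp hpre)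
    have h2 : pvP s w (PySem.Chars.find s w).toNat = true :=
      (PySem.Chars.startswith_iff _ _).mpr hpre
    have h3 : ∀ i < (PySem.Chars.find s w).toNat, ¬ pvP s w i = true := by
      intro i hi hp
      exact hmin i hi ((PySem.Chars.startswith_iff _ _).mp hp)
    rw [pvFind?_range_some h2 h3 s.length hlt, if_neg hne]

lemma pvLast_bridge (s w : List Char) (hw : w ≠ []) :
    pvSpecPos false s w s.length =
      (if PySem.Chars.rfind s w = -1 then none else some (PySem.Chars.rfind s w).toNat) := by
  have hplen : pvP s w s.length = false := by
    simp only [pvP, PySem.Chars.startswith, List.drop_length]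
    cases w with
    | nil => exact absurd rfl hw
    | cons a t => rfl
  have : PySem.Chars.rfind s w =
      ((pvSpecPos false s w s.length).elim (-1) (fun j => (j : Int))) := by
    show PySem.Chars.rfind.go s w s.length = _
    rw [pvRgo s w s.length]
    unfold pvSpecPos
    rw [List.range_succ, List.filter_append]
    simp [hplen]
  rw [this]
  cases hsp : pvSpecPos false s w s.length with
  | none => simp
  | some j => simp

-- final per-key fact: B's dict lookup says exactly what A's idx ≠ -1 test and value say
lemma pvPos_final (calibration : String) (first : Bool) :
    ∀ kw ∈ numbersDict.items,
      ((PySem.List.pyRange 0 (PySem.Str.len calibration) 1).foldl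
          (fun pos i => numbersDict.items.foldl (pvInnerStep first calibration.toList i) pos)
          (⟨[]⟩ : PySem.Dict Int Int)).get? kw.1
        = (if (if first then PySem.Str.find calibration kw.2
               else PySem.Str.rfind calibration kw.2) = -1 then none
           else some (if first then PySem.Str.find calibration kw.2
                      else PySem.Str.rfind calibration kw.2)) := by
  intro kw hmem
  have hlen : PySem.Str.len calibration = ((calibration.toList.length : Nat) : Int) :=
    PySem.Str.len_eq calibration
  rw [hlen, PySem.List.pyRange_zero_natCast,
    pvOuter_inv first calibration.toList calibration.toList.length kw.1 kw.2 hmem]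
  have hw := pvNumbers_ne_nil kw hmem
  cases first with
  | true =>
    rw [pvFirst_bridge calibration.toList kw.2.toList hw]
    rw [PySem.Str.find_eq]
    rcases eq_or_lt_of_le (PySem.Chars.neg_one_le_find calibration.toList kw.2.toList) with h | h
    · simp [← h]
    · have h0 : 0 ≤ PySem.Chars.find calibration.toList kw.2.toList := by omega
      have hne : ¬ PySem.Chars.find calibration.toList kw.2.toList = -1 := by omega
      simp [hne, Int.toNat_of_nonneg h0]
  | false =>
    rw [pvLast_bridge calibration.toList kw.2.toList hw]
    rw [PySem.Str.rfind_eq]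
    by_cases hne : PySem.Chars.rfind calibration.toList kw.2.toList = -1
    · simp [hne]
    · have h0 : 0 ≤ PySem.Chars.rfind calibration.toList kw.2.toList := by
        have : PySem.Chars.rfind calibration.toList kw.2.toList =
            PySem.Chars.rfind.go calibration.toList kw.2.toList calibration.toList.length := rfl
        rw [this, pvRgo] at hne ⊢
        cases h : (((List.range (calibration.toList.length + 1)).filter
            (pvP calibration.toList kw.2.toList)).getLast?) with
        | none => rw [h] at hne; exact absurd rfl hne
        | some j => simp
      simp [hne, Int.toNat_of_nonneg h0]

-- ===== VERDICT (by name: the statement is the Claim_ definition above) =====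
theorem find_all_words_spec : Claim_equal_find_all_words := by
  intro calibration first _
  unfold Spec_find_all_words find_all_words find_all_words_alt
  congr 1
  rw [show numbersDict.keys = numbersDict.items.map Prod.fst from rfl, List.foldl_map]
  apply PySem.List.foldl_congr_mem
  intro acc kw hmem
  rw [pvNumbers_get? kw hmem]
  rw [pvPos_final calibration first kw hmem]
  simp only [Option.getD_some]
  split_ifs <;> rfl
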